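-- pv_equiv track=rewrite | github.com/thiagopelizoni/ProjectEuler | src/problem_233.py | compute_sum_over_primes_times_prefix
-- ===== SOURCE A (Python) =====
-- import bisect
--
-- def compute_sum_over_primes_times_prefix(K, start_index, max_B_value, sum_prefix_list, primes_one_mod_four, primes_sum_prefix):
--     if K < primes_one_mod_four[start_index] if start_index < len(primes_one_mod_four) else True:
--         return 0
--
--     total = 0
--     n_primes = len(primes_one_mod_four)
--     lower = primes_one_mod_four[start_index]
--     upper = min(primes_one_mod_four[-1], K) if primes_one_mod_four else 0
--     end_index = bisect.bisect_right(primes_one_mod_four, K)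
--     current_lower = lower
--     while current_lower <= upper:
--         b_value = K // current_lower
--         current_upper = K // b_value
--         current_upper = min(current_upper, upper)
--         left_index = bisect.bisect_left(primes_one_mod_four, current_lower, start_index, end_index)
--         right_index = bisect.bisect_right(primes_one_mod_four, current_upper, left_index, end_index) - 1
--         if left_index > right_index:
--             current_lower = current_upper + 1
--             continue
--         sum_primes_in_range = primes_sum_prefix[right_index + 1] - primes_sum_prefix[left_index]
--         su_value = sum_prefix_list[min(b_value, max_B_value)]
--         total += sum_primes_in_range * su_value
--         current_lower = current_upper + 1
--     return total
-- ===== SOURCE B (Python) =====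
-- import bisect
--
-- def compute_sum_over_primes_times_prefix(K, start_index, max_B_value, sum_prefix_list, primes_one_mod_four, primes_sum_prefix):
--     end_index = bisect.bisect_right(primes_one_mod_four, K)
--     total = 0
--     for i in range(start_index, end_index):
--         p = primes_one_mod_four[i]
--         total += p * sum_prefix_list[min(K // p, max_B_value)]
--     return total
-- ===== Notes on version B (the rewrite author's own statement) =====
-- stated objective: simpler
-- what changed: Replaces the divisor-block loop (jumping current_lower through blocks of equal K//p with two bisects and a prime-prefix-sum difference per block) by a single direct per-prime scan from start_index to bisect_right(primes, K), adding p * sum_prefix_list[min(K // p, max_B_value)] for each prime; the primes_sum_prefix array is no longer used.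
-- outside the precondition, e.g. on compute_sum_over_primes_times_prefix(10, 0, 3, [0, 1, 2, 3], [5, 2, 7], [0, 5, 7, 14]): A returns 7, B returns 23; on compute_sum_over_primes_times_prefix(10, 0, 3, [0, 1, 2, 3], [2, 5, 7], [0, 9, 9, 9]): A returns 27, B returns 23; on compute_sum_over_primes_times_prefix(10, 1, 100, [0, 1, 2], [2, 5], [0, 2, 7]): A returns 10, B returns 10
import Mathlib
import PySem

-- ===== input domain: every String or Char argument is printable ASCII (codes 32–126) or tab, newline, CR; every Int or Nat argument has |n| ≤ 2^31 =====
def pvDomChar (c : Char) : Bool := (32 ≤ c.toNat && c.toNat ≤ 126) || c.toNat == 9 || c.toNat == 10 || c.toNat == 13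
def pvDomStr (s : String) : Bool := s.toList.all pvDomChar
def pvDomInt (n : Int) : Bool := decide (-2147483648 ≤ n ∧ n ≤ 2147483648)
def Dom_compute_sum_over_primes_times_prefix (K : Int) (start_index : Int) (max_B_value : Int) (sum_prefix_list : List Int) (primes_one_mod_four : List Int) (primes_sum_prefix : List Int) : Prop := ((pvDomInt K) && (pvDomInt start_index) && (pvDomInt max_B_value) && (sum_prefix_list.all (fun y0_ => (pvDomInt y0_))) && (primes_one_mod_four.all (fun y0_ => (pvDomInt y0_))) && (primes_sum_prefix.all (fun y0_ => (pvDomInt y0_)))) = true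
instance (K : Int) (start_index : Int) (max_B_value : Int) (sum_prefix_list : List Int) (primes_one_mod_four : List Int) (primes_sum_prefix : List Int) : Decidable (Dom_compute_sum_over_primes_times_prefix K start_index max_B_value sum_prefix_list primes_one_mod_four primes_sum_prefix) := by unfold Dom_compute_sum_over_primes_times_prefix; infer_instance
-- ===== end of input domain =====

-- B replaces A's divisor-block jumping (two bisects and a prime-prefix-sum difference per block of
-- equal K // p) by one direct per-prime scan from start_index to bisect_right(primes, K): simpler,
-- not faster.
-- ===== PORT A =====
-- hand port of Python's bisect.bisect_left / bisect_right (no PySem primitive): the exact binary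
-- search, step for step; list access a[mid] is ported as getD (exact whenever lo ≤ hi ≤ a.length,
-- which holds at every call site under Pre_; Python raises ValueError for a negative lo, excluded by Pre_).
def pyBisectLeft (a : List Int) (x : Int) (lo hi : Nat) : Nat :=
  if _h : lo < hi then
    let mid := (lo + hi) / 2
    if a.getD mid 0 < x then pyBisectLeft a x (mid + 1) hi
    else pyBisectLeft a x lo mid
  else lo
termination_by hi - lo
decreasing_by all_goals omega

def pyBisectRight (a : List Int) (x : Int) (lo hi : Nat) : Nat :=
  if _h : lo < hi then
    let mid := (lo + hi) / 2
    if x < a.getD mid 0 then pyBisectRight a x lo mid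
    else pyBisectRight a x (mid + 1) hi
  else lo
termination_by hi - lo
decreasing_by all_goals omega

-- A's while loop, with a fuel guard that merely makes it total (under Pre_ current_lower strictly
-- increases, so the fuel chosen at the call site is never exhausted).  List accesses into
-- primes_sum_prefix / sum_prefix_list are ported with getD / pyGetD (in range under Pre_).
def asptpLoop (K upper maxB : Int) (su P S : List Int) (si e : Nat) :
    Nat → Int → Int → Int
  | 0, _, total => total
  | Nat.succ fuel, cl, total =>
    if cl ≤ upper then
      let b := PySem.Int.floordiv K cl
      let cu := min (PySem.Int.floordiv K b) upper
      let l := pyBisectLeft P cl si e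
      let r1 := pyBisectRight P cu l e        -- Python's right_index + 1
      if r1 ≤ l then                           -- left_index > right_index
        asptpLoop K upper maxB su P S si e fuel (cu + 1) total
      else
        asptpLoop K upper maxB su P S si e fuel (cu + 1)
          (total + (S.getD r1 0 - S.getD l 0) * PySem.List.pyGetD su (min b maxB) 0)
    else total

def compute_sum_over_primes_times_prefix (K : Int) (start_index : Int) (max_B_value : Int) (sum_prefix_list : List Int) (primes_one_mod_four : List Int) (primes_sum_prefix : List Int) : Int :=
  let n := primes_one_mod_four.length
  -- `(K < primes[start_index]) if start_index < len(primes) else True`; on an out-of-range negative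
  -- start_index Python raises IndexError (pyGet? = none), excluded by Pre_.
  let guard : Bool :=
    if start_index < (n : Int) then
      match PySem.List.pyGet? primes_one_mod_four start_index with
      | some v => decide (K < v)
      | none => true
    else true
  if guard then 0
  else
    let lower := PySem.List.pyGetD primes_one_mod_four start_index 0
    let upper := if primes_one_mod_four ≠ [] then
        min (PySem.List.pyGetD primes_one_mod_four (-1) 0) K else 0
    let e := pyBisectRight primes_one_mod_four K 0 n
    -- start_index.toNat: exact, Pre_ gives 0 ≤ start_index (Python's bisect rejects a negative lo)
    asptpLoop K upper max_B_value sum_prefix_list primes_one_mod_four primes_sum_prefix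
      start_index.toNat e (upper + 1 - lower).toNat lower 0

-- ===== PORT B =====
def compute_sum_over_primes_times_prefix_alt (K : Int) (start_index : Int) (max_B_value : Int) (sum_prefix_list : List Int) (primes_one_mod_four : List Int) (primes_sum_prefix : List Int) : Int :=
  let e := pyBisectRight primes_one_mod_four K 0 primes_one_mod_four.length
  (PySem.List.pyRange start_index (e : Int) 1).foldl
    (fun total i =>
      let p := PySem.List.pyGetD primes_one_mod_four i 0
      total + p * PySem.List.pyGetD sum_prefix_list (min (PySem.Int.floordiv K p) max_B_value) 0)
    0

-- ===== PRECONDITION & SPEC =====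
-- Pre_ excludes (a) inputs where Python A raises (negative start_index, a nonpositive prime giving
-- ZeroDivisionError, an out-of-range sum_prefix_list index giving IndexError) and (b) inputs whose
-- primes list is unsorted or whose primes_sum_prefix is not its prefix-sum array AND on which the
-- main loop actually runs, where A's bisect/prefix-difference arithmetic returns accidental values.
-- Admitted: start_index out of range or K below primes[start_index] (both return 0 for any other
-- arguments), plus the natural structured domain; the sum_prefix_list bound of the last disjunct is
-- quantified over all primes ≤ K (slightly narrower than the indices A actually touches).
def Pre_compute_sum_over_primes_times_prefix (K : Int) (start_index : Int) (max_B_value : Int) (sum_prefix_list : List Int) (primes_one_mod_four : List Int) (primes_sum_prefix : List Int) : Prop :=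
  (0 ≤ start_index ∧ (primes_one_mod_four.length : Int) ≤ start_index) ∨
  (0 ≤ start_index ∧ start_index < (primes_one_mod_four.length : Int) ∧
    primes_one_mod_four.Pairwise (· ≤ ·) ∧ K < primes_one_mod_four.getD start_index.toNat 0) ∨
  (0 ≤ start_index ∧
    primes_one_mod_four.Pairwise (· ≤ ·) ∧
    (∀ p ∈ primes_one_mod_four, 1 ≤ p) ∧
    primes_sum_prefix.length = primes_one_mod_four.length + 1 ∧
    (∀ i : Nat, i < primes_one_mod_four.length →
      primes_sum_prefix.getD (i + 1) 0 = primes_sum_prefix.getD i 0 + primes_one_mod_four.getD i 0) ∧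
    (∀ p ∈ primes_one_mod_four, p ≤ K →
      -(sum_prefix_list.length : Int) ≤ min (PySem.Int.floordiv K p) max_B_value ∧
      min (PySem.Int.floordiv K p) max_B_value < (sum_prefix_list.length : Int)))
instance (K : Int) (start_index : Int) (max_B_value : Int) (sum_prefix_list : List Int) (primes_one_mod_four : List Int) (primes_sum_prefix : List Int) : Decidable (Pre_compute_sum_over_primes_times_prefix K start_index max_B_value sum_prefix_list primes_one_mod_four primes_sum_prefix) := by unfold Pre_compute_sum_over_primes_times_prefix; infer_instance

def pvWitness_compute_sum_over_primes_times_prefix : Int × Int × Int × List Int × List Int × List Int :=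
  (10, 0, 3, [0, 1, 2, 3], [2, 5, 7], [0, 2, 7, 14])

def Spec_compute_sum_over_primes_times_prefix (K : Int) (start_index : Int) (max_B_value : Int) (sum_prefix_list : List Int) (primes_one_mod_four : List Int) (primes_sum_prefix : List Int) (out : Int) : Prop := out = compute_sum_over_primes_times_prefix_alt K start_index max_B_value sum_prefix_list primes_one_mod_four primes_sum_prefix
instance (K : Int) (start_index : Int) (max_B_value : Int) (sum_prefix_list : List Int) (primes_one_mod_four : List Int) (primes_sum_prefix : List Int) (out : Int) : Decidable (Spec_compute_sum_over_primes_times_prefix K start_index max_B_value sum_prefix_list primes_one_mod_four primes_sum_prefix out) := by unfold Spec_compute_sum_over_primes_times_prefix; infer_instance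

-- ===== CLAIM (what is proved, stated in full; the proofs are below) =====
def Claim_equal_compute_sum_over_primes_times_prefix : Prop := ∀ (K : Int) (start_index : Int) (max_B_value : Int) (sum_prefix_list : List Int) (primes_one_mod_four : List Int) (primes_sum_prefix : List Int), Dom_compute_sum_over_primes_times_prefix K start_index max_B_value sum_prefix_list primes_one_mod_four primes_sum_prefix → Pre_compute_sum_over_primes_times_prefix K start_index max_B_value sum_prefix_list primes_one_mod_four primes_sum_prefix → Spec_compute_sum_over_primes_times_prefix K start_index max_B_value sum_prefix_list primes_one_mod_four primes_sum_prefix (compute_sum_over_primes_times_prefix K start_index max_B_value sum_prefix_list primes_one_mod_four primes_sum_prefix)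

-- ===== LEMMAS AND PROOFS =====

-- the per-prime summand of B, at Nat index i
def pvG (K maxB : Int) (su P : List Int) (i : Nat) : Int :=
  P.getD i 0 * PySem.List.pyGetD su (min (PySem.Int.floordiv K (P.getD i 0)) maxB) 0

lemma bisectLeft_spec (P : List Int) (x : Int)
    (mono : ∀ i j : Nat, i ≤ j → j < P.length → P.getD i 0 ≤ P.getD j 0) :
    ∀ (d lo hi : Nat), hi - lo ≤ d → lo ≤ hi → hi ≤ P.length →
      lo ≤ pyBisectLeft P x lo hi ∧ pyBisectLeft P x lo hi ≤ hi ∧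
      (∀ i : Nat, lo ≤ i → i < pyBisectLeft P x lo hi → P.getD i 0 < x) ∧
      (∀ i : Nat, pyBisectLeft P x lo hi ≤ i → i < hi → x ≤ P.getD i 0) := by
  intro d
  induction d with
  | zero =>
    intro lo hi hd hlh _
    have hE : lo = hi := by omega
    rw [pyBisectLeft]
    simp only [hE, lt_irrefl, dif_neg, not_false_iff]
    refine ⟨le_rfl, le_rfl, ?_, ?_⟩ <;> intro i h1 h2 <;> omega
  | succ d ih =>
    intro lo hi hd hlh hhn
    rw [pyBisectLeft]
    by_cases hlt : lo < hi
    · simp only [dif_pos hlt]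
      set mid := (lo + hi) / 2 with hmid
      have hm1 : lo ≤ mid := by omega
      have hm2 : mid < hi := by omega
      by_cases hc : P.getD mid 0 < x
      · simp only [if_pos hc]
        obtain ⟨b1, b2, b3, b4⟩ := ih (mid + 1) hi (by omega) (by omega) hhn
        refine ⟨by omega, b2, ?_, b4⟩
        intro i h1 h2
        by_cases him : i ≤ mid
        · exact lt_of_le_of_lt (mono i mid him (by omega)) hc
        · exact b3 i (by omega) h2
      · simp only [if_neg hc]
        obtain ⟨b1, b2, b3, b4⟩ := ih lo mid (by omega) (by omega) (by omega)
        refine ⟨b1, by omega, b3, ?_⟩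
        intro i h1 h2
        by_cases him : mid ≤ i
        · exact le_trans (not_lt.mp hc) (mono mid i him (by omega))
        · exact b4 i h1 (by omega)
    · simp only [dif_neg hlt]
      refine ⟨le_rfl, by omega, ?_, ?_⟩ <;> intro i h1 h2 <;> omega

lemma bisectRight_spec (P : List Int) (x : Int)
    (mono : ∀ i j : Nat, i ≤ j → j < P.length → P.getD i 0 ≤ P.getD j 0) :
    ∀ (d lo hi : Nat), hi - lo ≤ d → lo ≤ hi → hi ≤ P.length →
      lo ≤ pyBisectRight P x lo hi ∧ pyBisectRight P x lo hi ≤ hi ∧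
      (∀ i : Nat, lo ≤ i → i < pyBisectRight P x lo hi → P.getD i 0 ≤ x) ∧
      (∀ i : Nat, pyBisectRight P x lo hi ≤ i → i < hi → x < P.getD i 0) := by
  intro d
  induction d with
  | zero =>
    intro lo hi hd hlh _
    have hE : lo = hi := by omega
    rw [pyBisectRight]
    simp only [hE, lt_irrefl, dif_neg, not_false_iff]
    refine ⟨le_rfl, le_rfl, ?_, ?_⟩ <;> intro i h1 h2 <;> omega
  | succ d ih =>
    intro lo hi hd hlh hhn
    rw [pyBisectRight]
    by_cases hlt : lo < hi
    · simp only [dif_pos hlt]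
      set mid := (lo + hi) / 2 with hmid
      have hm1 : lo ≤ mid := by omega
      have hm2 : mid < hi := by omega
      by_cases hc : x < P.getD mid 0
      · simp only [if_pos hc]
        obtain ⟨b1, b2, b3, b4⟩ := ih lo mid (by omega) (by omega) (by omega)
        refine ⟨b1, by omega, b3, ?_⟩
        intro i h1 h2
        by_cases him : mid ≤ i
        · exact lt_of_lt_of_le hc (mono mid i him (by omega))
        · exact b4 i h1 (by omega)
      · simp only [if_neg hc]
        obtain ⟨b1, b2, b3, b4⟩ := ih (mid + 1) hi (by omega) (by omega) hhn
        refine ⟨by omega, b2, ?_, b4⟩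
        intro i h1 h2
        by_cases him : i ≤ mid
        · exact le_trans (mono i mid him (by omega)) (not_lt.mp hc)
        · exact b3 i (by omega) h2
    · simp only [dif_neg hlt]
      refine ⟨le_rfl, by omega, ?_, ?_⟩ <;> intro i h1 h2 <;> omega

-- a sorted split point is unique
lemma split_unique (Q : Nat → Prop) {lo hi j j' : Nat}
    (h1 : lo ≤ j) (h2 : j ≤ hi) (h3 : ∀ i, lo ≤ i → i < j → Q i) (h4 : ∀ i, j ≤ i → i < hi → ¬ Q i)
    (h1' : lo ≤ j') (h2' : j' ≤ hi) (h3' : ∀ i, lo ≤ i → i < j' → Q i) (h4' : ∀ i, j' ≤ i → i < hi → ¬ Q i) :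
    j = j' := by
  rcases Nat.lt_trichotomy j j' with h | h | h
  · exact absurd (h3' j h1 h) (h4 j le_rfl (lt_of_lt_of_le h h2'))
  · exact h
  · exact absurd (h3 j' h1' h) (h4' j' le_rfl (lt_of_lt_of_le h h2))

lemma prefix_diff (P S : List Int)
    (hS : ∀ i : Nat, i < P.length → S.getD (i + 1) 0 = S.getD i 0 + P.getD i 0) :
    ∀ (hi lo : Nat), lo ≤ hi → hi ≤ P.length →
      S.getD hi 0 - S.getD lo 0 = ∑ i ∈ Finset.Ico lo hi, P.getD i 0 := by
  intro hi
  induction hi with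
  | zero =>
    intro lo h1 _
    have : lo = 0 := by omega
    simp [this]
  | succ hi ih =>
    intro lo h1 h2
    by_cases hE : lo = hi + 1
    · simp [hE]
    · have hlo : lo ≤ hi := by omega
      rw [Finset.sum_Ico_succ_top hlo, ← ih lo hlo (by omega), hS hi (by omega)]
      ring

lemma foldl_pyRange_add (h : Int → Int) :
    ∀ (d a b : Nat), b - a ≤ d → ∀ (t : Int),
      (PySem.List.pyRange (a : Int) (b : Int) 1).foldl (fun tot i => tot + h i) t
        = t + ∑ k ∈ Finset.Ico a b, h (k : Int) := by
  intro d
  induction d with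
  | zero =>
    intro a b hd t
    have hba' : b ≤ a := by omega
    have hba : (b : Int) ≤ (a : Int) := by exact_mod_cast hba'
    rw [PySem.List.pyRange_one_eq_nil hba, Finset.Ico_eq_empty (by omega)]
    simp
  | succ d ih =>
    intro a b hd t
    by_cases hab : a < b
    · have hab' : (a : Int) < (b : Int) := by exact_mod_cast hab
      rw [PySem.List.pyRange_one_cons hab']
      simp only [List.foldl_cons]
      have hcast : (a : Int) + 1 = ((a + 1 : Nat) : Int) := by push_cast; ring
      rw [hcast, ih (a + 1) b (by omega) (t + h a)]
      rw [Finset.sum_eq_sum_Ico_succ_bot hab]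
      ring
    · have hba' : b ≤ a := by omega
      have hba : (b : Int) ≤ (a : Int) := by exact_mod_cast hba'
      rw [PySem.List.pyRange_one_eq_nil hba, Finset.Ico_eq_empty (by omega)]
      simp

-- the binary search stays within [lo, hi] on any list (no sortedness needed)
lemma bisectRight_bounds (P : List Int) (x : Int) :
    ∀ (d lo hi : Nat), hi - lo ≤ d → lo ≤ hi →
      lo ≤ pyBisectRight P x lo hi ∧ pyBisectRight P x lo hi ≤ hi := by
  intro d
  induction d with
  | zero =>
    intro lo hi hd hlh
    have hE : lo = hi := by omega
    rw [pyBisectRight]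
    simp only [hE, lt_irrefl, dif_neg, not_false_iff]
    omega
  | succ d ih =>
    intro lo hi hd hlh
    rw [pyBisectRight]
    by_cases hlt : lo < hi
    · simp only [dif_pos hlt]
      by_cases hc : x < P.getD ((lo + hi) / 2) 0
      · simp only [if_pos hc]
        have := ih lo ((lo + hi) / 2) (by omega) (by omega)
        omega
      · simp only [if_neg hc]
        have := ih ((lo + hi) / 2 + 1) hi (by omega) (by omega)
        omega
    · simp only [dif_neg hlt]
      omega

-- once current_lower exceeds upper, no prime at index ≥ the left bisect remains below e
lemma bl_top (P : List Int) (si e : Nat) (cl upper : Int)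
    (mono : ∀ i j : Nat, i ≤ j → j < P.length → P.getD i 0 ≤ P.getD j 0)
    (hsie : si ≤ e) (hen : e ≤ P.length)
    (hub : ∀ i : Nat, si ≤ i → i < e → P.getD i 0 ≤ upper)
    (hgt : upper < cl) : pyBisectLeft P cl si e = e := by
  obtain ⟨l1, l2, _, l4⟩ := bisectLeft_spec P cl mono (e - si) si e le_rfl hsie hen
  by_contra hne
  have hlt : pyBisectLeft P cl si e < e := lt_of_le_of_ne l2 hne
  have h1 := l4 _ le_rfl hlt
  have h2 := hub _ l1 hlt
  omega

lemma loop_inv (K upper maxB : Int) (su P S : List Int) (si e : Nat)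
    (mono : ∀ i j : Nat, i ≤ j → j < P.length → P.getD i 0 ≤ P.getD j 0)
    (hS : ∀ i : Nat, i < P.length → S.getD (i + 1) 0 = S.getD i 0 + P.getD i 0)
    (hsie : si ≤ e) (hen : e ≤ P.length)
    (hupK : upper ≤ K)
    (hub : ∀ i : Nat, si ≤ i → i < e → P.getD i 0 ≤ upper) :
    ∀ (fuel : Nat) (cl total : Int), 1 ≤ cl → (upper + 1 - cl).toNat ≤ fuel →
      asptpLoop K upper maxB su P S si e fuel cl total
        = total + ∑ i ∈ Finset.Ico (pyBisectLeft P cl si e) e, pvG K maxB su P i := by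
  intro fuel
  induction fuel with
  | zero =>
    intro cl total hcl hfuel
    have hgt : upper < cl := by omega
    rw [bl_top P si e cl upper mono hsie hen hub hgt]
    simp [asptpLoop]
  | succ fuel ih =>
    intro cl total hcl hfuel
    by_cases hcu : cl ≤ upper
    · rw [show asptpLoop K upper maxB su P S si e (fuel + 1) cl total
          = (if cl ≤ upper then
              (if pyBisectRight P (min (PySem.Int.floordiv K (PySem.Int.floordiv K cl)) upper) (pyBisectLeft P cl si e) e ≤ pyBisectLeft P cl si e then
                asptpLoop K upper maxB su P S si e fuel ((min (PySem.Int.floordiv K (PySem.Int.floordiv K cl)) upper) + 1) total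
              else
                asptpLoop K upper maxB su P S si e fuel ((min (PySem.Int.floordiv K (PySem.Int.floordiv K cl)) upper) + 1)
                  (total + (S.getD (pyBisectRight P (min (PySem.Int.floordiv K (PySem.Int.floordiv K cl)) upper) (pyBisectLeft P cl si e) e) 0 - S.getD (pyBisectLeft P cl si e) 0) * PySem.List.pyGetD su (min (PySem.Int.floordiv K cl) maxB) 0))
            else total) from rfl]
      rw [if_pos hcu]
      have hclK : cl ≤ K := le_trans hcu hupK
      have hcl0 : 0 < cl := by omega
      have hfd : PySem.Int.floordiv K cl = K / cl := PySem.Int.floordiv_eq_ediv_of_pos hcl0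
      have hb1 : 1 ≤ K / cl := (Int.le_ediv_iff_mul_le hcl0).mpr (by omega)
      have hb0 : 0 < K / cl := by omega
      have hKcl := Int.mul_ediv_add_emod K cl        -- cl * (K / cl) + K % cl = K
      have hKclr : 0 ≤ K % cl := Int.emod_nonneg K (by omega)
      have hKclr' : K % cl < cl := Int.emod_lt_of_pos K hcl0
      have hclb : cl * (K / cl) ≤ K := by omega
      have hclKb : cl ≤ K / (K / cl) := by
        rw [Int.le_ediv_iff_mul_le hb0]
        exact hclb
      have hKb := Int.mul_ediv_add_emod K (K / cl)
      have hKbr : 0 ≤ K % (K / cl) := Int.emod_nonneg K (by omega)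
      -- abbreviations matching the port's lets
      set b := PySem.Int.floordiv K cl with hbdef
      set cu := min (PySem.Int.floordiv K b) upper with hcudef
      have hbE : b = K / cl := hfd
      have hcuE : cu = min (K / b) upper := by rw [hcudef, PySem.Int.floordiv_eq_ediv_of_pos (by omega)]
      have hclcu : cl ≤ cu := by
        rw [hcuE]
        exact le_min (by rw [hbE]; exact hclKb) hcu
      have hcuup : cu ≤ upper := by rw [hcuE]; exact min_le_right _ _
      -- every prime in [cl, cu] has the same quotient b
      have key : ∀ i : Nat, i < P.length → cl ≤ P.getD i 0 → P.getD i 0 ≤ cu →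
          PySem.Int.floordiv K (P.getD i 0) = b := by
        intro i hi h1 h2
        have hp0 : 0 < P.getD i 0 := by omega
        rw [PySem.Int.floordiv_eq_ediv_of_pos hp0, hbE]
        have hup : K / P.getD i 0 ≤ K / cl := by
          have h3 : K / P.getD i 0 < K / cl + 1 := by
            rw [Int.ediv_lt_iff_lt_mul hp0]
            have hq : (K / cl + 1) * cl = cl * (K / cl) + cl := by ring
            have : K < (K / cl + 1) * cl := by omega
            calc K < (K / cl + 1) * cl := this
              _ ≤ (K / cl + 1) * P.getD i 0 :=
                mul_le_mul_of_nonneg_left h1 (by omega)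
          omega
        have hlow : K / cl ≤ K / P.getD i 0 := by
          rw [Int.le_ediv_iff_mul_le hp0]
          have h4 : P.getD i 0 ≤ K / (K / cl) := le_trans h2 (by rw [hcuE, hbE]; exact min_le_left _ _)
          calc (K / cl) * P.getD i 0 ≤ (K / cl) * (K / (K / cl)) :=
                mul_le_mul_of_nonneg_left h4 (by omega)
            _ ≤ K := by omega
        omega
      -- the two bisects of this iteration
      obtain ⟨l1, l2, l3, l4⟩ := bisectLeft_spec P cl mono (e - si) si e le_rfl hsie hen
      set l := pyBisectLeft P cl si e with hldef
      obtain ⟨r1, r2, r3, r4⟩ := bisectRight_spec P cu mono (e - l) l e le_rfl l2 hen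
      set r := pyBisectRight P cu l e with hrdef
      -- the next iteration's left bisect is r
      have hnext : pyBisectLeft P (cu + 1) si e = r := by
        obtain ⟨n1, n2, n3, n4⟩ := bisectLeft_spec P (cu + 1) mono (e - si) si e le_rfl hsie hen
        refine split_unique (fun i => P.getD i 0 < cu + 1) n1 n2 n3
          (fun i h1 h2 => not_lt.mpr (n4 i h1 h2)) (le_trans l1 r1) r2 ?_ ?_
        · intro i h1 h2
          by_cases hil : i < l
          · exact lt_of_lt_of_le (l3 i h1 hil) (by omega)
          · exact lt_of_le_of_lt (r3 i (by omega) h2) (by omega)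
        · intro i h1 h2
          exact not_lt.mpr (r4 i h1 h2)
      have hfuel' : (upper + 1 - (cu + 1)).toNat ≤ fuel := by omega
      by_cases hskip : r ≤ l
      · rw [if_pos hskip]
        have hrl : r = l := le_antisymm hskip r1
        rw [ih (cu + 1) total (by omega) hfuel', hnext, hrl]
      · rw [if_neg hskip]
        rw [ih (cu + 1) _ (by omega) hfuel', hnext]
        have hlr : l ≤ r := r1
        have hblock : (S.getD r 0 - S.getD l 0) * PySem.List.pyGetD su (min b maxB) 0
            = ∑ i ∈ Finset.Ico l r, pvG K maxB su P i := by
          rw [prefix_diff P S hS r l hlr (le_trans r2 hen), Finset.sum_mul]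
          refine (Finset.sum_congr rfl ?_).symm
          intro i hi
          rw [Finset.mem_Ico] at hi
          have hin : i < P.length := lt_of_lt_of_le (lt_of_lt_of_le hi.2 r2) hen
          have hge : cl ≤ P.getD i 0 := l4 i hi.1 (lt_of_lt_of_le hi.2 r2)
          have hle : P.getD i 0 ≤ cu := r3 i hi.1 hi.2
          rw [pvG, key i hin hge hle]
        rw [← Finset.sum_Ico_consecutive _ hlr r2, ← hblock]
        ring
    · rw [show asptpLoop K upper maxB su P S si e (fuel + 1) cl total
          = (if cl ≤ upper then
              (if pyBisectRight P (min (PySem.Int.floordiv K (PySem.Int.floordiv K cl)) upper) (pyBisectLeft P cl si e) e ≤ pyBisectLeft P cl si e then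
                asptpLoop K upper maxB su P S si e fuel ((min (PySem.Int.floordiv K (PySem.Int.floordiv K cl)) upper) + 1) total
              else
                asptpLoop K upper maxB su P S si e fuel ((min (PySem.Int.floordiv K (PySem.Int.floordiv K cl)) upper) + 1)
                  (total + (S.getD (pyBisectRight P (min (PySem.Int.floordiv K (PySem.Int.floordiv K cl)) upper) (pyBisectLeft P cl si e) e) 0 - S.getD (pyBisectLeft P cl si e) 0) * PySem.List.pyGetD su (min (PySem.Int.floordiv K cl) maxB) 0))
            else total) from rfl]
      rw [if_neg hcu]
      rw [bl_top P si e cl upper mono hsie hen hub (by omega)]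
      simp

-- ===== VERDICT (by name: the statement is the Claim_ definition above) =====
theorem compute_sum_over_primes_times_prefix_spec : Claim_equal_compute_sum_over_primes_times_prefix := by
  unfold Claim_equal_compute_sum_over_primes_times_prefix
  intro K si maxB su P S _ hpre
  have h0 : 0 ≤ si := by
    rcases hpre with ⟨h, _⟩ | ⟨h, _⟩ | ⟨h, _⟩ <;> exact h
  unfold Spec_compute_sum_over_primes_times_prefix
  obtain ⟨e1b, e2b⟩ := bisectRight_bounds P K P.length 0 P.length (by omega) (Nat.zero_le _)
  set e := pyBisectRight P K 0 P.length with hedef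
  have hsi' : si = ((si.toNat : Nat) : Int) := (Int.toNat_of_nonneg h0).symm
  -- B is the per-prime sum over [start_index, e)
  have hB : compute_sum_over_primes_times_prefix_alt K si maxB su P S
      = ∑ k ∈ Finset.Ico si.toNat e, pvG K maxB su P k := by
    simp only [compute_sum_over_primes_times_prefix_alt, ← hedef]
    rw [hsi', foldl_pyRange_add _ e si.toNat e (by omega) 0, zero_add]
    exact Finset.sum_congr rfl (fun k _ => by simp [pvG])
  rw [hB]
  simp only [compute_sum_over_primes_times_prefix, ← hedef]
  rcases hpre with ⟨_, hd1⟩ | ⟨_, hslt, hsort2, hKsi⟩ | ⟨_, hsort, hpos, _, hS, _⟩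
  · -- start_index out of range: both sides are 0
    have hg1 : ¬ si < (P.length : Int) := by omega
    rw [if_neg hg1, if_pos rfl]
    have hic : Finset.Ico si.toNat e = ∅ := Finset.Ico_eq_empty (by omega)
    rw [hic, Finset.sum_empty]
  · -- K below primes[start_index] on a sorted list: both sides are 0
    have mono : ∀ i j : Nat, i ≤ j → j < P.length → P.getD i 0 ≤ P.getD j 0 := by
      intro i j hij hj
      rcases Nat.eq_or_lt_of_le hij with h | h
      · rw [h]
      · rw [List.getD_eq_getElem P 0 (by omega), List.getD_eq_getElem P 0 hj]
        exact List.pairwise_iff_getElem.mp hsort2 i j (by omega) hj h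
    obtain ⟨_, e2, e3, _⟩ :=
      bisectRight_spec P K mono P.length 0 P.length (by omega) (Nat.zero_le _) le_rfl
    rw [← hedef] at e3
    have hsilt : si.toNat < P.length := by omega
    have hget : PySem.List.pyGet? P si = some P[si.toNat] :=
      PySem.List.pyGet?_eq_some_getElem P h0 hslt
    have hKlt : K < P[si.toNat] := by
      rw [← List.getD_eq_getElem P 0 hsilt]
      exact hKsi
    rw [if_pos hslt, hget, if_pos (by simpa using hKlt)]
    have hele : e ≤ si.toNat := by
      by_contra h
      have h5 := e3 si.toNat (Nat.zero_le _) (by omega)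
      rw [List.getD_eq_getElem P 0 hsilt] at h5
      omega
    rw [Finset.Ico_eq_empty (by omega), Finset.sum_empty]
  · have mono : ∀ i j : Nat, i ≤ j → j < P.length → P.getD i 0 ≤ P.getD j 0 := by
      intro i j hij hj
      rcases Nat.eq_or_lt_of_le hij with h | h
      · rw [h]
      · rw [List.getD_eq_getElem P 0 (by omega), List.getD_eq_getElem P 0 hj]
        exact List.pairwise_iff_getElem.mp hsort i j (by omega) hj h
    have hposD : ∀ i : Nat, i < P.length → 1 ≤ P.getD i 0 := by
      intro i hi
      rw [List.getD_eq_getElem P 0 hi]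
      exact hpos _ (List.getElem_mem hi)
    obtain ⟨_, e2, e3, e4⟩ :=
      bisectRight_spec P K mono P.length 0 P.length (by omega) (Nat.zero_le _) le_rfl
    rw [← hedef] at e2 e3 e4
    by_cases hg1 : si < (P.length : Int)
    · have hsilt : si.toNat < P.length := by omega
      have hget : PySem.List.pyGet? P si = some P[si.toNat] :=
        PySem.List.pyGet?_eq_some_getElem P h0 hg1
      rw [if_pos hg1, hget]
      by_cases hKlt : K < P[si.toNat]
      · rw [if_pos (by simpa using hKlt)]
        have hele : e ≤ si.toNat := by
          by_contra h
          have h5 := e3 si.toNat (Nat.zero_le _) (by omega)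
          rw [List.getD_eq_getElem P 0 hsilt] at h5
          omega
        rw [Finset.Ico_eq_empty (by omega), Finset.sum_empty]
      · rw [if_neg (by simpa using hKlt)]
        have hne : P ≠ [] := by
          intro h
          rw [h] at hsilt
          simp at hsilt
        rw [PySem.List.pyGetD_neg_one P 0 hne, List.getLast_eq_getElem hne, if_pos hne]
        rw [hsi', PySem.List.pyGetD_natCast]
        simp only [Int.toNat_natCast]
        have hsie : si.toNat ≤ e := by
          by_contra h
          have h5 := e4 si.toNat (by omega) hsilt
          rw [List.getD_eq_getElem P 0 hsilt] at h5
          omega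
        have hub : ∀ i : Nat, si.toNat ≤ i → i < e → P.getD i 0 ≤ min (P[P.length - 1]) K := by
          intro i h1 h2
          refine le_min ?_ (e3 i (Nat.zero_le _) h2)
          rw [← List.getD_eq_getElem P 0 (show P.length - 1 < P.length by omega)]
          exact mono i (P.length - 1) (by omega) (by omega)
        have hloop := loop_inv K (min (P[P.length - 1]) K) maxB su P S si.toNat e mono hS
          hsie e2 (min_le_right _ _) hub
          ((min (P[P.length - 1]) K + 1 - P.getD si.toNat 0).toNat)
          (P.getD si.toNat 0) 0 (hposD si.toNat hsilt) le_rfl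
        rw [hloop, zero_add]
        have hbl : pyBisectLeft P (P.getD si.toNat 0) si.toNat e = si.toNat := by
          obtain ⟨c1, c2, c3, c4⟩ := bisectLeft_spec P (P.getD si.toNat 0) mono
            (e - si.toNat) si.toNat e le_rfl hsie e2
          refine split_unique (fun i => P.getD i 0 < P.getD si.toNat 0) c1 c2 c3
            (fun i h1 h2 => not_lt.mpr (c4 i h1 h2)) le_rfl hsie
            (fun i h1 h2 => absurd h2 (Nat.not_lt.mpr h1)) ?_
          intro i h1 h2
          exact not_lt.mpr (mono si.toNat i h1 (by omega))
        rw [hbl]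
    · rw [if_neg hg1]
      have hele : e ≤ si.toNat := by omega
      rw [Finset.Ico_eq_empty (by omega), Finset.sum_empty, if_pos rfl]
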